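-- pv_equiv track=rewrite | github.com/093lus/google_interview_prep | maximum_index.py | max_index_range
-- ===== SOURCE A (Python) =====
-- def max_index_range(arr):
--     res = len(arr)-1
--     while res:
--         for i in range(len(arr)):
--             if i + res > len(arr) - 1:
--                 break
--             if arr[i] < arr[i + res]:
--                 return res
--
--         res-=1
--     return res
-- ===== SOURCE B (Python) =====
-- def max_index_range(arr):
--     # O(n): suffix-max array + two-pointer scan (A re-scans for every gap size).
--     n = len(arr)
--     suff = list(arr)
--     for k in range(n - 2, -1, -1):
--         if suff[k + 1] > suff[k]:
--             suff[k] = suff[k + 1]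
--     ans = 0
--     i = j = 0
--     while i < n and j < n:
--         if arr[i] < suff[j]:
--             if j - i > ans:
--                 ans = j - i
--             j += 1
--         else:
--             i += 1
--     return ans
-- ===== Notes on version B (the rewrite author's own statement) =====
-- stated objective: faster
-- what changed: Replaced A's descending search over gap sizes (re-scanning the array for every gap) by a single suffix-max array plus a two-pointer scan.
-- outside the precondition, e.g. on max_index_range([]): A does not finish within the time limit, B returns 0
import Mathlib
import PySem

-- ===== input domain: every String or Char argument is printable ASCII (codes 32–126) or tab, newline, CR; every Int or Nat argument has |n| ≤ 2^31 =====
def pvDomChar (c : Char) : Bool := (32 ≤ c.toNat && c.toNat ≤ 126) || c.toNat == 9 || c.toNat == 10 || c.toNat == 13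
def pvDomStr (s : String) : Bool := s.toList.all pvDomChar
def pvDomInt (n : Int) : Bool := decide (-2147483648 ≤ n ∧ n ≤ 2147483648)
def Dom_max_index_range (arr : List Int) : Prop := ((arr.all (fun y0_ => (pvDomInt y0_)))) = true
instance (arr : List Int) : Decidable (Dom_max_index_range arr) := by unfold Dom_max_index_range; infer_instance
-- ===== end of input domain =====

-- B replaces A's descending gap-by-gap rescans with one suffix-max pass and a two-pointer
-- scan; the claim is about the RETURN value on nonempty lists (A never terminates on []).

-- ===== PORT A =====
-- inner 'for i in range(len(arr))' loop with its break / early return: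
-- returns true iff it hits 'return res' (all indices it reads are in range, so getD is exact)
def maxIdxInner (arr : List Int) (res : Nat) (i : Nat) : Nat → Bool
  | 0 => false
  | fuel + 1 =>
    if i < arr.length then
      if i + res > arr.length - 1 then false
      else if arr.getD i 0 < arr.getD (i + res) 0 then true
      else maxIdxInner arr res (i + 1) fuel
    else false

-- outer 'while res:' loop, res counting down to 0 (res starts at len-1 ≥ 0 on Pre_)
def maxIdxOuter (arr : List Int) (res : Nat) : Int :=
  match res with
  | 0 => 0
  | r + 1 => if maxIdxInner arr (r + 1) 0 arr.length then ((r : Int) + 1) else maxIdxOuter arr r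

def max_index_range (arr : List Int) : Int :=
  maxIdxOuter arr (arr.length - 1)

-- ===== PORT B =====
-- 'suff = list(arr); for k in range(n-2,-1,-1): ...' — the backward pass is the
-- right-to-left structural recursion: each cell becomes max(its value, cell to its right)
def bSuff : List Int → List Int
  | [] => []
  | [x] => [x]
  | x :: y :: rest =>
      let s := bSuff (y :: rest)
      (if s.headD 0 > x then s.headD 0 else x) :: s

-- 'while i < n and j < n: ...' (all reads in range, so getD is exact)
def bLoop (arr suff : List Int) : Nat → Nat → Nat → Int → Int
  | 0, _, _, ans => ans
  | fuel + 1, i, j, ans =>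
    if i < arr.length ∧ j < arr.length then
      if arr.getD i 0 < suff.getD j 0 then
        bLoop arr suff fuel i (j + 1) (if (j : Int) - (i : Int) > ans then (j : Int) - (i : Int) else ans)
      else bLoop arr suff fuel (i + 1) j ans
    else ans

def max_index_range_alt (arr : List Int) : Int :=
  bLoop arr (bSuff arr) (2 * arr.length + 1) 0 0 0

-- ===== PRECONDITION & SPEC =====
-- Pre_ excludes the empty list, on which A's 'while res:' starts at res = -1 and never
-- terminates (B returns 0 there).
def Pre_max_index_range (arr : List Int) : Prop := arr ≠ []
instance (arr : List Int) : Decidable (Pre_max_index_range arr) := by unfold Pre_max_index_range; infer_instance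
def pvWitness_max_index_range : List Int := [0, 1]

def Spec_max_index_range (arr : List Int) (out : Int) : Prop := out = max_index_range_alt arr
instance (arr : List Int) (out : Int) : Decidable (Spec_max_index_range arr out) := by unfold Spec_max_index_range; infer_instance

-- ===== CLAIM (what is proved, stated in full; the proofs are below) =====
def Claim_equal_max_index_range : Prop := ∀ (arr : List Int), Dom_max_index_range arr → Pre_max_index_range arr → Spec_max_index_range arr (max_index_range arr)

-- ===== LEMMAS AND PROOFS =====

-- a gap g is feasible iff some pair at distance g is increasing
def feasibleB (arr : List Int) (g : Nat) : Bool :=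
  decide (∃ i < arr.length, i + g < arr.length ∧ arr.getD i 0 < arr.getD (i + g) 0)

theorem feasibleB_iff (arr : List Int) (g : Nat) : feasibleB arr g = true ↔
    ∃ i < arr.length, i + g < arr.length ∧ arr.getD i 0 < arr.getD (i + g) 0 := by
  simp [feasibleB]

-- the common value both programs compute
def bestGap (arr : List Int) : Nat :=
  Nat.findGreatest (fun g => feasibleB arr g = true) (arr.length - 1)

theorem inner_iff (arr : List Int) (res : Nat) (hres : 1 ≤ res) (hn : arr ≠ []) :
    ∀ fuel i, arr.length - i ≤ fuel → (maxIdxInner arr res i fuel = true ↔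
      ∃ k, i ≤ k ∧ k + res < arr.length ∧ arr.getD k 0 < arr.getD (k + res) 0) := by
  have hlen : 1 ≤ arr.length := List.length_pos_iff.mpr hn
  intro fuel
  induction fuel with
  | zero =>
    intro i hfi
    have hi : ¬ i < arr.length := by omega
    rw [maxIdxInner]
    constructor
    · intro h; cases h
    · rintro ⟨k, hk1, hk2, _⟩; omega
  | succ fuel ih =>
    intro i hfi
    rw [maxIdxInner]
    by_cases hi : i < arr.length
    · simp only [hi, if_true]
      by_cases hb : i + res > arr.length - 1
      · simp only [hb, if_true]
        constructor
        · intro h; cases h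
        · rintro ⟨k, hk1, hk2, _⟩; omega
      · simp only [hb, if_false]
        by_cases hc : arr.getD i 0 < arr.getD (i + res) 0
        · simp only [hc, if_true]
          constructor
          · intro _; exact ⟨i, le_refl i, by omega, hc⟩
          · intro _; trivial
        · simp only [hc, if_false]
          rw [ih (i + 1) (by omega)]
          constructor
          · rintro ⟨k, hk1, hk2, hk3⟩; exact ⟨k, by omega, hk2, hk3⟩
          · rintro ⟨k, hk1, hk2, hk3⟩
            refine ⟨k, ?_, hk2, hk3⟩
            rcases Nat.eq_or_lt_of_le hk1 with h | h
            · exact absurd (h ▸ hk3) hc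
            · omega
    · simp only [hi, if_false]
      constructor
      · intro h; cases h
      · rintro ⟨k, hk1, hk2, _⟩; omega

theorem outer_eq (arr : List Int) (hn : arr ≠ []) :
    ∀ r, maxIdxOuter arr r = ((Nat.findGreatest (fun g => feasibleB arr g = true) r : Nat) : Int) := by
  intro r
  induction r with
  | zero => simp [maxIdxOuter]
  | succ r ih =>
    rw [maxIdxOuter, Nat.findGreatest_succ]
    by_cases hf : feasibleB arr (r + 1) = true
    · obtain ⟨k, hk1, hk2, hk3⟩ := (feasibleB_iff arr (r + 1)).mp hf
      have hinner : maxIdxInner arr (r + 1) 0 arr.length = true := by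
        rw [inner_iff arr (r + 1) (by omega) hn arr.length 0 (by omega)]
        exact ⟨k, Nat.zero_le k, hk2, hk3⟩
      rw [hinner, if_pos rfl, if_pos hf]
      push_cast
      ring
    · have hinner : maxIdxInner arr (r + 1) 0 arr.length = false := by
        rw [Bool.eq_false_iff]
        intro hcon
        rw [inner_iff arr (r + 1) (by omega) hn arr.length 0 (by omega)] at hcon
        obtain ⟨k, _, hk2, hk3⟩ := hcon
        exact hf ((feasibleB_iff arr (r + 1)).mpr ⟨k, by omega, hk2, hk3⟩)
      rw [hinner, if_neg (by simp), if_neg hf]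
      exact ih

-- suffix-max facts
theorem bSuff_length (l : List Int) : (bSuff l).length = l.length := by
  induction l with
  | nil => rfl
  | cons x t ih =>
    cases t with
    | nil => rfl
    | cons y rest => simp [bSuff]; simpa [bSuff] using ih

theorem headD_eq_getD (l : List Int) (h : l ≠ []) : l.headD 0 = l.getD 0 0 := by
  cases l with
  | nil => exact absurd rfl h
  | cons a s => rfl

theorem bSuff_ne_nil (l : List Int) (h : l ≠ []) : bSuff l ≠ [] := by
  intro hc
  have hlen := bSuff_length l
  rw [hc] at hlen
  exact h (List.length_eq_zero_iff.mp hlen.symm)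

theorem bSuff_headD (y : Int) (rest : List Int) :
    (bSuff (y :: rest)).headD 0 = (bSuff (y :: rest)).getD 0 0 :=
  headD_eq_getD _ (bSuff_ne_nil _ (by simp))

theorem bSuff_ge (l : List Int) : ∀ j < l.length, l.getD j 0 ≤ (bSuff l).getD j 0 := by
  induction l with
  | nil => intro j hj; simp at hj
  | cons x t ih =>
    cases t with
    | nil =>
      intro j hj
      have hj0 : j = 0 := by simp at hj; omega
      subst hj0
      simp [bSuff]
    | cons y rest =>
      intro j hj
      cases j with
      | zero =>
        simp only [bSuff, List.getD_cons_zero]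
        split <;> omega
      | succ j =>
        simp only [bSuff, List.getD_cons_succ]
        exact ih j (by simpa using Nat.lt_of_succ_lt_succ hj)

theorem bSuff_adj (l : List Int) : ∀ j, j + 1 < l.length →
    (bSuff l).getD (j + 1) 0 ≤ (bSuff l).getD j 0 := by
  induction l with
  | nil => intro j hj; simp at hj
  | cons x t ih =>
    cases t with
    | nil => intro j hj; simp at hj
    | cons y rest =>
      intro j hj
      cases j with
      | zero =>
        simp only [bSuff, List.getD_cons_zero, List.getD_cons_succ]
        rw [← bSuff_headD]
        split <;> omega
      | succ j =>
        simp only [bSuff, List.getD_cons_succ]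
        exact ih j (by simpa using Nat.lt_of_succ_lt_succ hj)

theorem bSuff_mono (l : List Int) : ∀ j j', j ≤ j' → j' < l.length →
    (bSuff l).getD j' 0 ≤ (bSuff l).getD j 0 := by
  intro j j' hjj
  induction hjj with
  | refl => intro _; exact le_refl _
  | @step m hm ihs =>
    intro hl
    exact le_trans (bSuff_adj l m hl) (ihs (by omega))

theorem bSuff_attained (l : List Int) : ∀ j < l.length,
    ∃ j', j ≤ j' ∧ j' < l.length ∧ l.getD j' 0 = (bSuff l).getD j 0 := by
  induction l with
  | nil => intro j hj; simp at hj
  | cons x t ih =>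
    cases t with
    | nil =>
      intro j hj
      have hj0 : j = 0 := by simp at hj; omega
      subst hj0
      exact ⟨0, le_refl 0, by simp, by simp [bSuff]⟩
    | cons y rest =>
      intro j hj
      cases j with
      | zero =>
        simp only [bSuff, List.getD_cons_zero]
        split
        · obtain ⟨k, _, hk2, hk3⟩ := ih 0 (by simp)
          refine ⟨k + 1, Nat.zero_le _, by simpa using Nat.succ_lt_succ hk2, ?_⟩
          rw [List.getD_cons_succ, bSuff_headD]
          exact hk3
        · exact ⟨0, le_refl 0, by simp, by simp⟩
      | succ j =>
        simp only [bSuff, List.getD_cons_succ]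
        obtain ⟨k, hk1, hk2, hk3⟩ := ih j (by simpa using Nat.lt_of_succ_lt_succ hj)
        exact ⟨k + 1, Nat.succ_le_succ hk1, by simpa using Nat.succ_lt_succ hk2, hk3⟩

theorem bLoop_ge_ans (arr suff : List Int) :
    ∀ fuel i j ans, ans ≤ bLoop arr suff fuel i j ans := by
  intro fuel
  induction fuel with
  | zero => intro i j ans; exact le_of_eq (by rw [bLoop])
  | succ fuel ih =>
    intro i j ans
    rw [bLoop]
    split
    · split
      · refine le_trans ?_ (ih i (j + 1) _)
        split <;> omega
      · exact ih (i + 1) j ans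
    · exact le_refl _

-- if the two-pointer credits j - i, then some real pair has gap ≥ j - i
theorem credit_le (arr : List Int) (i j : Nat) (hj : j < arr.length)
    (hR : arr.getD i 0 < (bSuff arr).getD j 0) :
    (j : Int) - (i : Int) ≤ ((bestGap arr : Nat) : Int) := by
  obtain ⟨j', hjj', hj'len, heq⟩ := bSuff_attained arr j hj
  have hlt : arr.getD i 0 < arr.getD j' 0 := heq ▸ hR
  by_cases hij : i < j'
  · have hfeas : feasibleB arr (j' - i) = true := by
      refine (feasibleB_iff arr (j' - i)).mpr ⟨i, by omega, by omega, ?_⟩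
      have hrw : i + (j' - i) = j' := by omega
      rw [hrw]; exact hlt
    have hle : j' - i ≤ bestGap arr :=
      Nat.le_findGreatest (by omega) hfeas
    omega
  · have : (0 : Int) ≤ ((bestGap arr : Nat) : Int) := Int.natCast_nonneg _
    omega

theorem bLoop_upper (arr : List Int) :
    ∀ fuel i j ans, ans ≤ ((bestGap arr : Nat) : Int) →
      bLoop arr (bSuff arr) fuel i j ans ≤ ((bestGap arr : Nat) : Int) := by
  intro fuel
  induction fuel with
  | zero => intro i j ans hans; rw [bLoop]; exact hans
  | succ fuel ih =>
    intro i j ans hans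
    rw [bLoop]
    split
    · rename_i h
      split
      · rename_i hlt
        apply ih
        split
        · exact credit_le arr i j h.2 hlt
        · exact hans
      · exact ih (i + 1) j ans hans
    · exact hans

theorem bLoop_lower (arr : List Int) (istar : Nat) (g : Nat)
    (hg : 1 ≤ g) (hin : istar + g < arr.length)
    (hlt : arr.getD istar 0 < arr.getD (istar + g) 0) :
    ∀ fuel i j ans, 2 * arr.length ≤ fuel + i + j →
      ((g : Int) ≤ ans ∨ (i ≤ istar ∧ j ≤ istar + g)) →
      (g : Int) ≤ bLoop arr (bSuff arr) fuel i j ans := by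
  intro fuel
  induction fuel with
  | zero =>
    intro i j ans hfuel hyp
    rw [bLoop]
    rcases hyp with hc | ⟨hi, hj⟩
    · exact hc
    · omega
  | succ fuel ih =>
    intro i j ans hfuel hyp
    rw [bLoop]
    split
    · rename_i h
      split
      · rename_i hR
        apply ih i (j + 1) _ (by omega)
        rcases hyp with hc | ⟨hi, hj⟩
        · left; split <;> omega
        · rcases Nat.lt_or_ge j (istar + g) with hj' | hj'
          · right; exact ⟨hi, by omega⟩
          · left
            have hj0 : j = istar + g := by omega
            split <;> omega
      · rename_i hR
        apply ih (i + 1) j ans (by omega)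
        rcases hyp with hc | ⟨hi, hj⟩
        · left; exact hc
        · right
          refine ⟨?_, hj⟩
          have hRstar : arr.getD istar 0 < (bSuff arr).getD j 0 := by
            calc arr.getD istar 0 < arr.getD (istar + g) 0 := hlt
              _ ≤ (bSuff arr).getD (istar + g) 0 := bSuff_ge arr (istar + g) hin
              _ ≤ (bSuff arr).getD j 0 := bSuff_mono arr j (istar + g) hj hin
          have hne : i ≠ istar := by
            intro he
            exact hR (he ▸ hRstar)
          omega
    · rename_i h
      rcases hyp with hc | ⟨hi, hj⟩
      · exact hc
      · exact absurd ⟨by omega, by omega⟩ h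

theorem alt_eq (arr : List Int) : max_index_range_alt arr = ((bestGap arr : Nat) : Int) := by
  unfold max_index_range_alt
  apply le_antisymm
  · exact bLoop_upper arr (2 * arr.length + 1) 0 0 0 (Int.natCast_nonneg _)
  · rcases Nat.eq_zero_or_pos (bestGap arr) with h0 | hpos
    · rw [h0]
      simpa using bLoop_ge_ans arr (bSuff arr) (2 * arr.length + 1) 0 0 0
    · have hfeas : feasibleB arr (bestGap arr) = true := by
        obtain ⟨n, hn0, hnk, hPn⟩ := Nat.findGreatest_pos.mp hpos
        unfold bestGap
        exact Nat.findGreatest_spec (P := fun g => feasibleB arr g = true) hnk hPn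
      obtain ⟨istar, _, hin, hlt⟩ := (feasibleB_iff arr (bestGap arr)).mp hfeas
      exact bLoop_lower arr istar (bestGap arr) hpos hin hlt (2 * arr.length + 1) 0 0 0
        (by omega) (Or.inr ⟨Nat.zero_le _, Nat.zero_le _⟩)

-- ===== VERDICT (by name: the statement is the Claim_ definition above) =====
theorem max_index_range_spec : Claim_equal_max_index_range := by
  intro arr _ hpre
  unfold Spec_max_index_range
  rw [alt_eq, max_index_range, outer_eq arr hpre, bestGap]
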